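-- pv_equiv track=rewrite | github.com/byeong-chang/Baekjoon-programmers | 프로그래머스/lv2/42578. 의상/의상.py | solution
-- ===== SOURCE A (Python) =====
-- def solution(clothes):
--     # 보자마자 수학문제라는 생각이 들었다.
--     # 분류별로 dict 자료형에 담아서 value의 개수를 세려 뭔가 공식을 사용하면 답이 나올 것 같은 기분이 들었다.
--     dict_cloth = dict()
--     answer = 1
--     for cloth in clothes:
--         if cloth[1] in dict_cloth:
--             dict_cloth[cloth[1]] +=1
--         else:
--             dict_cloth[cloth[1]] = 1
--     for num in dict_cloth.values():
--         answer *= (num+1)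
--     return answer-1
-- ===== SOURCE B (Python) =====
-- def solution(clothes):
--     # sort the category keys, then scan consecutive runs and multiply (run length + 1)
--     keys = sorted(cloth[1] for cloth in clothes)
--     answer = 1
--     i = 0
--     n = len(keys)
--     while i < n:
--         j = i
--         while j < n and keys[j] == keys[i]:
--             j += 1
--         answer *= 1 + (j - i)
--         i = j
--     return answer - 1
-- ===== Notes on version B (the rewrite author's own statement) =====
-- stated objective: alternative
-- what changed: Replaces the dict-based per-category counting with sorting the category keys and scanning consecutive runs, multiplying (run length + 1) per run.
import Mathlib
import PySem

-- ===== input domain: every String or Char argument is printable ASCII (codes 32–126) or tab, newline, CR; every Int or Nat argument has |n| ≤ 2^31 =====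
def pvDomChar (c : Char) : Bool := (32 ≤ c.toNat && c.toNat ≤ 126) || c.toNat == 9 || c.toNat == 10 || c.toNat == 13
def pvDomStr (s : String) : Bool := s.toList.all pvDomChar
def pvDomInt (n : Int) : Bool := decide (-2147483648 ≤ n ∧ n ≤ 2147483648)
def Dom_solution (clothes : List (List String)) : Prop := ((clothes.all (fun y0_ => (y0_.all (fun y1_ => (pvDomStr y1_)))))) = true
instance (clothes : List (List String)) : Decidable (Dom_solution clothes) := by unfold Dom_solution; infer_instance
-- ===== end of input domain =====

-- B replaces A's dict-based per-category counting by sorting the category keys and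
-- scanning consecutive runs (alternative decomposition, similar cost).

-- cloth[1]; exact whenever the row has length ≥ 2 (guaranteed by Pre_solution)
def pvKey (cloth : List String) : String := (PySem.List.pyGet? cloth 1).getD ""

-- ===== PORT A =====
def solution (clothes : List (List String)) : Int :=
  let dict_cloth := clothes.foldl (fun d cloth =>
      if d.contains (pvKey cloth) then d.insert (pvKey cloth) (d.getD (pvKey cloth) 0 + 1)
      else d.insert (pvKey cloth) 1)
    (PySem.Dict.empty : PySem.Dict String Int)
  let answer := dict_cloth.values.foldl (fun answer num => answer * (num + 1)) 1
  answer - 1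

-- ===== PORT B =====
-- the while loop over runs of equal keys in the sorted list: each step consumes one run
def bRuns : List String → Int
  | [] => 1
  | k :: t =>
    (1 + (1 + ((t.takeWhile (fun x => x == k)).length : Int))) *
      bRuns (t.dropWhile (fun x => x == k))
termination_by l => l.length
decreasing_by
  simpa using Nat.lt_succ_of_le (List.length_dropWhile_le _ _)

def solution_alt (clothes : List (List String)) : Int :=
  bRuns (PySem.List.sorted (clothes.map pvKey) (fun x => x) false) - 1

-- ===== PRECONDITION & SPEC =====
-- Pre_ excludes exactly the rows with fewer than 2 entries, on which Python's cloth[1] raises IndexError.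
def Pre_solution (clothes : List (List String)) : Prop := ∀ c ∈ clothes, 2 ≤ c.length
instance (clothes : List (List String)) : Decidable (Pre_solution clothes) := by
  unfold Pre_solution; infer_instance
def pvWitness_solution : List (List String) :=
  [["hat", "head"], ["cap", "head"], ["shirt", "top"]]
def Spec_solution (clothes : List (List String)) (out : Int) : Prop := out = solution_alt clothes
instance (clothes : List (List String)) (out : Int) : Decidable (Spec_solution clothes out) := by unfold Spec_solution; infer_instance

-- ===== CLAIM (what is proved, stated in full; the proofs are below) =====
def Claim_equal_solution : Prop := ∀ (clothes : List (List String)), Dom_solution clothes → Pre_solution clothes → Spec_solution clothes (solution clothes)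

-- ===== LEMMAS AND PROOFS =====

-- canonical value both sides reach: product of (count+1) over the distinct keys
def pvProd (l : List String) : Int :=
  ((PySem.Set.ofList l).map (fun k => (l.count k : Int) + 1)).prod

theorem pvProd_perm {l l' : List String} (h : l.Perm l') : pvProd l = pvProd l' := by
  unfold pvProd
  have hm : ∀ k, l.count k = l'.count k := fun k => h.count_eq k
  have hperm : (PySem.Set.ofList l).Perm (PySem.Set.ofList l') := by
    rw [List.perm_ext_iff_of_nodup (PySem.Set.nodup_ofList l) (PySem.Set.nodup_ofList l')]
    intro a
    simp only [PySem.Set.mem_ofList]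
    exact ⟨fun ha => h.mem_iff.mp ha, fun ha => h.mem_iff.mpr ha⟩
  calc ((PySem.Set.ofList l).map (fun k => (l.count k : Int) + 1)).prod
      = ((PySem.Set.ofList l).map (fun k => (l'.count k : Int) + 1)).prod := by
        congr 1; exact List.map_congr_left (fun k _ => by rw [hm])
    _ = ((PySem.Set.ofList l').map (fun k => (l'.count k : Int) + 1)).prod :=
        (hperm.map _).prod_eq

theorem foldl_mul_succ (l : List Int) (a : Int) :
    l.foldl (fun answer num => answer * (num + 1)) a = a * (l.map (fun n => n + 1)).prod := by
  induction l generalizing a with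
  | nil => simp
  | cons x xs ih => simp [List.foldl_cons, ih, mul_assoc]

-- ---- A side ----
theorem solution_eq_pvProd (clothes : List (List String)) :
    solution clothes = pvProd (clothes.map pvKey) - 1 := by
  unfold solution
  have hfold : clothes.foldl (fun d cloth =>
      if d.contains (pvKey cloth) then d.insert (pvKey cloth) (d.getD (pvKey cloth) 0 + 1)
      else d.insert (pvKey cloth) 1) (PySem.Dict.empty : PySem.Dict String Int)
      = PySem.Dict.counter (clothes.map pvKey) := by
    rw [← PySem.Dict.foldl_insert_getD_add_one_eq_counter, List.foldl_map]
    apply PySem.List.foldl_congr_mem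
    intro d c _
    by_cases h : d.contains (pvKey c) = true
    · simp [h]
    · rw [PySem.Dict.getD_of_not_contains _ _ (by simpa using h)]
      simp [h]
  have hvals : (PySem.Dict.counter (clothes.map pvKey)).values
      = (PySem.Set.ofList (clothes.map pvKey)).map (fun k => ((clothes.map pvKey).count k : Int)) := by
    show ((PySem.Dict.counter (clothes.map pvKey)).items).map Prod.snd = _
    rw [PySem.Dict.items_counter, List.map_map]
    rfl
  simp only [hfold, hvals, foldl_mul_succ]
  unfold pvProd
  rw [List.map_map, one_mul]
  rfl

-- ---- B side ----
theorem notmem_dropWhile_run (k : String) (t : List String)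
    (hp : t.Pairwise (· ≤ ·)) (hge : ∀ x ∈ t, k ≤ x) :
    k ∉ t.dropWhile (fun x => x == k) := by
  induction t with
  | nil => simp
  | cons a t' ih =>
    by_cases ha : (a == k) = true
    · rw [List.dropWhile_cons, if_pos ha]
      exact ih (List.Pairwise.of_cons hp) (fun x hx => hge x (List.mem_cons_of_mem _ hx))
    · rw [List.dropWhile_cons, if_neg (by simpa using ha)]
      have hak : a ≠ k := by simpa using ha
      intro hk
      rcases List.mem_cons.mp hk with h | h
      · exact hak h.symm
      · have h1 : a ≤ k := (List.pairwise_cons.mp hp).1 k h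
        have h2 : k ≤ a := hge a (List.mem_cons_self)
        exact hak (le_antisymm h1 h2)

theorem discard_not_mem (s : List String) (k : String) (h : k ∉ s) :
    PySem.Set.discard s k = s := by
  unfold PySem.Set.discard
  apply List.filter_eq_self.mpr
  intro x hx
  simp only [Bool.not_eq_eq_eq_not, Bool.not_true, beq_eq_false_iff_ne]
  exact fun hxk => h (hxk ▸ hx)

theorem ofList_run (k : String) (g r : List String)
    (hg : ∀ x ∈ g, x = k) (hr : k ∉ r) :
    PySem.Set.ofList (k :: (g ++ r)) = k :: PySem.Set.ofList r := by
  induction g with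
  | nil =>
    rw [List.nil_append, PySem.Set.ofList_cons,
      discard_not_mem _ _ (by simpa [PySem.Set.mem_ofList] using hr)]
  | cons a g' ih =>
    have hak : a = k := hg a (List.mem_cons_self)
    subst hak
    have ih' := ih (fun x hx => hg x (List.mem_cons_of_mem _ hx))
    rw [List.cons_append, PySem.Set.ofList_cons, ih']
    rw [show PySem.Set.discard (a :: PySem.Set.ofList r) a = PySem.Set.ofList r from by
      unfold PySem.Set.discard
      rw [List.filter_cons_of_neg (by simp)]
      exact discard_not_mem _ _ (by simpa [PySem.Set.mem_ofList] using hr)]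

theorem bRuns_eq_pvProd (s : List String) (hs : s.Pairwise (· ≤ ·)) :
    bRuns s = pvProd s := by
  induction s using bRuns.induct with
  | case1 => simp [bRuns, pvProd, PySem.Set.ofList]
  | case2 k t ih =>
    have htp : t.Pairwise (· ≤ ·) := List.Pairwise.of_cons hs
    have hge : ∀ x ∈ t, k ≤ x := (List.pairwise_cons.mp hs).1
    set g := t.takeWhile (fun x => x == k) with hgdef
    set r := t.dropWhile (fun x => x == k) with hrdef
    have hgk : ∀ x ∈ g, x = k := fun x hx => by
      have := List.mem_takeWhile_imp hx
      simpa using this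
    have hknr : k ∉ r := notmem_dropWhile_run k t htp hge
    have ht : g ++ r = t := List.takeWhile_append_dropWhile
    have hrp : r.Pairwise (· ≤ ·) := List.Pairwise.sublist (List.dropWhile_sublist _) htp
    have hset : PySem.Set.ofList (k :: t) = k :: PySem.Set.ofList r := by
      rw [← ht]; exact ofList_run k g r hgk hknr
    have hckk : (k :: t).count k = 1 + g.length := by
      rw [← ht, List.count_cons_self, List.count_append]
      rw [List.count_eq_length.mpr (fun b hb => by simp [hgk b hb]),
        List.count_eq_zero.mpr hknr]
      omega
    rw [bRuns]
    unfold pvProd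
    rw [hset, List.map_cons, List.prod_cons, hckk]
    have htail : (PySem.Set.ofList r).map (fun k' => (((k :: t).count k' : Int)) + 1)
        = (PySem.Set.ofList r).map (fun k' => ((r.count k' : Int)) + 1) := by
      apply List.map_congr_left
      intro k' hk'
      have hk'r : k' ∈ r := (PySem.Set.mem_ofList _ _).mp hk'
      have hk'k : k' ≠ k := fun h => hknr (h ▸ hk'r)
      have : (k :: t).count k' = r.count k' := by
        rw [← ht, List.count_cons_of_ne hk'k.symm, List.count_append,
          List.count_eq_zero.mpr (fun h => hk'k (hgk k' h))]
        omega
      rw [this]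
    rw [htail, ih hrp, pvProd]
    push_cast
    ring

-- ===== VERDICT (by name: the statement is the Claim_ definition above) =====
theorem solution_spec : Claim_equal_solution := by
  intro clothes _ _
  unfold Spec_solution solution_alt
  rw [solution_eq_pvProd]
  have hperm := PySem.List.sorted_perm (clothes.map pvKey) (fun x : String => x) false
  rw [bRuns_eq_pvProd _ (by simpa using PySem.List.sorted_pairwise (clothes.map pvKey) (fun x : String => x))]
  rw [pvProd_perm hperm]
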